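-- pv_equiv track=rewrite | github.com/MMA2004/ADA | Tarea3/calculus.py | calcular_signos
-- ===== SOURCE A (Python) =====
-- def calcular_signos(expresion):
--
--     signos = []
--     signo_del_parentesis = [1]
--     signo_actual = 1
--
--     for simbolo in expresion:
--         if simbolo == 'x':
--             signos.append(signo_actual)
--         elif simbolo == '+':
--             signo_actual = signo_del_parentesis[-1]
--         elif simbolo == '-':
--             signo_actual= -(signo_del_parentesis[-1])
--         elif simbolo == '(':
--             signo_del_parentesis.append(signo_actual)
--         elif simbolo == ')':
--             signo_del_parentesis.pop()
--             signo_actual = signo_del_parentesis[-1]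
--
--     return signos
-- ===== SOURCE B (Python) =====
-- def calcular_signos(expresion):
--     # Recursive-descent parser: parse(i, paren_sign) scans from index i with the
--     # enclosing parenthesis sign, returning (signs, next_index, saw_close).
--     def parse(i, paren_sign):
--         signs = []
--         cur = paren_sign
--         n = len(expresion)
--         while i < n:
--             c = expresion[i]
--             i += 1
--             if c == 'x':
--                 signs.append(cur)
--             elif c == '+':
--                 cur = paren_sign
--             elif c == '-':
--                 cur = -paren_sign
--             elif c == '(':
--                 sub, i, closed = parse(i, cur)
--                 signs.extend(sub)
--                 if not closed:
--                     return signs, i, False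
--                 cur = paren_sign
--             elif c == ')':
--                 return signs, i, True
--         return signs, i, False
--     return parse(0, 1)[0]
-- ===== Notes on version B (the rewrite author's own statement) =====
-- stated objective: alternative
-- what changed: Replaces A's single loop over an explicit stack of parenthesis signs with a recursive-descent parser parse(i, paren_sign) that recurses on '(' and returns on ')', so no sign stack is maintained.
import Mathlib
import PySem

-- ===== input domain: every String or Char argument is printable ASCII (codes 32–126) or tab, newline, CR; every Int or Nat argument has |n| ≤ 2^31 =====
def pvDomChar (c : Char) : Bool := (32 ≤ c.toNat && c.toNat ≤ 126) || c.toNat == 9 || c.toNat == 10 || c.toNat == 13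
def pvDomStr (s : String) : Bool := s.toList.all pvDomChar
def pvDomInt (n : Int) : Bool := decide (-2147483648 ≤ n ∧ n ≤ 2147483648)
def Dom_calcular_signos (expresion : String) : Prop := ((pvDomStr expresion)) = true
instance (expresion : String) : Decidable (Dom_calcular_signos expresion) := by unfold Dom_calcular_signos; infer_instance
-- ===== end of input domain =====

-- B replaces A's explicit stack of parenthesis signs with a recursive-descent parser (alternative decomposition, same cost).


-- ===== PORT A =====
-- A's loop state: (signos, stack of parenthesis signs with TOP AT HEAD, signo_actual).
-- When the stack is empty, Python has already raised IndexError (pop/peek on the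
-- empty list); the port freezes the state there (signo_actual pinned to 0 — it is
-- unobservable in the returned value) — those inputs are outside Pre_.
def calcStepA (st : List Int × List Int × Int) (c : Char) : List Int × List Int × Int :=
  match st with
  | (signos, [], _) => (signos, [], 0)          -- Python has raised; frozen
  | (signos, h :: t, cur) =>
    if c = 'x' then (signos ++ [cur], h :: t, cur)
    else if c = '+' then (signos, h :: t, h)
    else if c = '-' then (signos, h :: t, -h)
    else if c = '(' then (signos, cur :: h :: t, cur)
    else if c = ')' then
      match t with
      | t0 :: t' => (signos, t0 :: t', t0)
      | [] => (signos, [], 0)                   -- pop empties the stack; [-1] raises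
    else (signos, h :: t, cur)

def calcular_signos (expresion : String) : List Int :=
  (expresion.toList.foldl calcStepA ([], [1], 1)).1

-- ===== PORT B =====
-- Source B's parse(i, paren_sign): here the index i becomes the list of remaining
-- characters; fuel only makes the nested recursion structural — it never runs out
-- when fuel ≥ chars.length (the only call site).  Returns (signs, rest, saw_close).
def parseB : Nat → List Char → Int → Int → List Int × List Char × Bool
  | 0, chars, _, _ => ([], chars, false)
  | _ + 1, [], _, _ => ([], [], false)
  | f + 1, c :: rest, ps, cur =>
    if c = 'x' then
      match parseB f rest ps cur with
      | (s, r, b) => (cur :: s, r, b)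
    else if c = '+' then parseB f rest ps ps
    else if c = '-' then parseB f rest ps (-ps)
    else if c = '(' then
      match parseB f rest cur cur with
      | (sub, r, closed) =>
        if closed then
          match parseB f r ps ps with
          | (s2, r2, b2) => (sub ++ s2, r2, b2)
        else (sub, r, false)
    else if c = ')' then ([], rest, true)
    else parseB f rest ps cur

def calcular_signos_alt (expresion : String) : List Int :=
  (parseB expresion.toList.length expresion.toList 1 1).1

-- ===== PRECONDITION & SPEC =====
-- Pre_ excludes exactly the strings on which Python A raises IndexError:
-- those with a prefix containing more ')' than '('.
def Pre_calcular_signos (expresion : String) : Prop :=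
  ∀ i ∈ List.range (expresion.toList.length + 1),
    (expresion.toList.take i).count ')' ≤ (expresion.toList.take i).count '('
instance (expresion : String) : Decidable (Pre_calcular_signos expresion) := by
  unfold Pre_calcular_signos; infer_instance

def pvWitness_calcular_signos : String := "x-(x+x)"

def Spec_calcular_signos (expresion : String) (out : List Int) : Prop := out = calcular_signos_alt expresion
instance (expresion : String) (out : List Int) : Decidable (Spec_calcular_signos expresion out) := by unfold Spec_calcular_signos; infer_instance

-- ===== CLAIM (what is proved, stated in full; the proofs are below) =====
def Claim_equal_calcular_signos : Prop := ∀ (expresion : String), Dom_calcular_signos expresion → Pre_calcular_signos expresion → Spec_calcular_signos expresion (calcular_signos expresion)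

-- ===== LEMMAS AND PROOFS =====

lemma parseB_nil (f : Nat) (ps cur : Int) : parseB f [] ps cur = ([], [], false) := by
  cases f <;> rfl

-- B's parse only ever consumes characters
lemma parseB_rest_len (f : Nat) : ∀ (chars : List Char) (ps cur : Int),
    (parseB f chars ps cur).2.1.length ≤ chars.length := by
  induction f with
  | zero => intro chars ps cur; simp [parseB]
  | succ f ih =>
    intro chars ps cur
    cases chars with
    | nil => simp [parseB]
    | cons c rest =>
      by_cases hx : c = 'x'
      · have h := ih rest ps cur
        rcases hr : parseB f rest ps cur with ⟨s1, r1, b1⟩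
        simp only [parseB, hx, hr]
        rw [hr] at h; simp at h ⊢; omega
      · by_cases hp : c = '+'
        · have h := ih rest ps ps
          simp only [parseB, hx, hp]
          simp at h ⊢; omega
        · by_cases hm : c = '-'
          · have h := ih rest ps (-ps)
            simp only [parseB, hx, hp, hm]
            simp at h ⊢; omega
          · by_cases ho : c = '('
            · rcases hr : parseB f rest cur cur with ⟨s1, r1, b1⟩
              have h1 := ih rest cur cur; rw [hr] at h1; simp at h1
              simp only [parseB, hx, hp, hm, ho, hr]
              cases b1 with
              | false => simp at h1 ⊢; omega
              | true =>
                rcases hr2 : parseB f r1 ps ps with ⟨s2, r2, b2⟩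
                have h2 := ih r1 ps ps; rw [hr2] at h2; simp at h2
                simp at h1 ⊢; omega
            · by_cases hc : c = ')'
              · simp only [parseB, hx, hp, hm, ho, hc]
                simp
              · have h := ih rest ps cur
                simp only [parseB, hx, hp, hm, ho, hc]
                simp at h ⊢; omega

-- once the sign stack is empty (Python has raised), A's fold no longer moves
lemma foldl_frozen : ∀ (chars : List Char) (signos : List Int),
    List.foldl calcStepA (signos, ([] : List Int), (0 : Int)) chars = (signos, [], 0) := by
  intro chars
  induction chars with
  | nil => intro signos; rfl
  | cons c rest ih => intro signos; simpa [List.foldl, calcStepA] using ih signos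

-- what A's fold does after B's parse returns: pop to the parent level, or freeze
def contA (r : List Char) (acc : List Int) (stack : List Int) : List Int × List Int × Int :=
  match stack with
  | t :: st => List.foldl calcStepA (acc, t :: st, t) r
  | [] => (acc, [], 0)

lemma contA_append (r : List Char) (a b : List Int) (stack : List Int) (c : List Int) :
    contA r (a ++ b ++ c) stack = contA r (a ++ (b ++ c)) stack := by
  cases stack <;> simp [contA]

-- MAIN INVARIANT: running A's fold from sign stack s :: stack and current sign cur
-- is: run B's parse with paren_sign s; if it saw ')', continue A's fold after the
-- pop on the rest; otherwise the input is exhausted and the signs are final.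
lemma parse_fold (f : Nat) : ∀ (chars : List Char), chars.length ≤ f →
    ∀ (s cur : Int) (sub : List Int) (r : List Char) (cl : Bool),
      parseB f chars s cur = (sub, r, cl) →
      ∀ (signos stack : List Int),
        (cl = true →
          List.foldl calcStepA (signos, s :: stack, cur) chars = contA r (signos ++ sub) stack) ∧
        (cl = false → ∃ st' c',
          List.foldl calcStepA (signos, s :: stack, cur) chars = (signos ++ sub, st', c')) := by
  induction f with
  | zero =>
    intro chars hlen s cur sub r cl hp signos stack
    have hnil : chars = [] := List.eq_nil_of_length_eq_zero (Nat.le_zero.mp hlen)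
    subst hnil
    rw [parseB_nil] at hp
    simp only [Prod.mk.injEq] at hp
    obtain ⟨rfl, rfl, rfl⟩ := hp
    exact ⟨fun h => by simp at h, fun _ => ⟨s :: stack, cur, by simp⟩⟩
  | succ f ih =>
    intro chars hlen s cur sub r cl hp signos stack
    cases chars with
    | nil =>
      rw [parseB_nil] at hp
      simp only [Prod.mk.injEq] at hp
      obtain ⟨rfl, rfl, rfl⟩ := hp
      exact ⟨fun h => by simp at h, fun _ => ⟨s :: stack, cur, by simp⟩⟩
    | cons c rest =>
      have hrl : rest.length ≤ f := by simp at hlen; omega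
      by_cases hx : c = 'x'
      · subst hx
        rcases hr : parseB f rest s cur with ⟨s1, r1, b1⟩
        rw [show parseB (f+1) ('x'::rest) s cur = (cur :: s1, r1, b1) by
          simp only [parseB, hr]; simp] at hp
        simp only [Prod.mk.injEq] at hp
        obtain ⟨rfl, rfl, rfl⟩ := hp
        have hstep : List.foldl calcStepA (signos, s :: stack, cur) ('x'::rest)
            = List.foldl calcStepA (signos ++ [cur], s :: stack, cur) rest := by
          simp [List.foldl, calcStepA]
        have H := ih rest hrl s cur s1 r1 b1 hr (signos ++ [cur]) stack
        refine ⟨fun h => ?_, fun h => ?_⟩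
        · rw [hstep, (H.1 h)]
          cases stack <;> simp [contA]
        · obtain ⟨st', c', he⟩ := H.2 h
          exact ⟨st', c', by rw [hstep, he]; simp⟩
      · by_cases hpl : c = '+'
        · subst hpl
          rw [show parseB (f+1) ('+'::rest) s cur = parseB f rest s s by
            simp only [parseB]; simp] at hp
          have hstep : List.foldl calcStepA (signos, s :: stack, cur) ('+'::rest)
              = List.foldl calcStepA (signos, s :: stack, s) rest := by
            simp [List.foldl, calcStepA]
          have H := ih rest hrl s s sub r cl hp signos stack
          exact ⟨fun h => by rw [hstep]; exact H.1 h, fun h => by rw [hstep]; exact H.2 h⟩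
        · by_cases hm : c = '-'
          · subst hm
            rw [show parseB (f+1) ('-'::rest) s cur = parseB f rest s (-s) by
              simp only [parseB]; simp] at hp
            have hstep : List.foldl calcStepA (signos, s :: stack, cur) ('-'::rest)
                = List.foldl calcStepA (signos, s :: stack, -s) rest := by
              simp [List.foldl, calcStepA]
            have H := ih rest hrl s (-s) sub r cl hp signos stack
            exact ⟨fun h => by rw [hstep]; exact H.1 h, fun h => by rw [hstep]; exact H.2 h⟩
          · by_cases ho : c = '('
            · subst ho
              rcases hr1 : parseB f rest cur cur with ⟨s1, r1, b1⟩
              have hstep : List.foldl calcStepA (signos, s :: stack, cur) ('('::rest)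
                  = List.foldl calcStepA (signos, cur :: s :: stack, cur) rest := by
                simp [List.foldl, calcStepA]
              have Hc := ih rest hrl cur cur s1 r1 b1 hr1 signos (s :: stack)
              cases b1 with
              | false =>
                rw [show parseB (f+1) ('('::rest) s cur = (s1, r1, false) by
                  simp only [parseB, hr1]; simp] at hp
                simp only [Prod.mk.injEq] at hp
                obtain ⟨rfl, rfl, rfl⟩ := hp
                refine ⟨fun h => by simp at h, fun _ => ?_⟩
                obtain ⟨st', c', he⟩ := Hc.2 rfl
                exact ⟨st', c', by rw [hstep, he]⟩
              | true =>
                have hfold1 : List.foldl calcStepA (signos, cur :: s :: stack, cur) rest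
                    = List.foldl calcStepA (signos ++ s1, s :: stack, s) r1 := Hc.1 rfl
                have hr1l : r1.length ≤ f := by
                  have := parseB_rest_len f rest cur cur
                  rw [hr1] at this; simp at this; omega
                rcases hr2 : parseB f r1 s s with ⟨s2, r2, b2⟩
                rw [show parseB (f+1) ('('::rest) s cur = (s1 ++ s2, r2, b2) by
                  simp only [parseB, hr1, hr2]; simp] at hp
                simp only [Prod.mk.injEq] at hp
                obtain ⟨rfl, rfl, rfl⟩ := hp
                have H2 := ih r1 hr1l s s s2 r2 b2 hr2 (signos ++ s1) stack
                refine ⟨fun h => ?_, fun h => ?_⟩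
                · rw [hstep, hfold1, H2.1 h, contA_append]
                · obtain ⟨st', c', he⟩ := H2.2 h
                  exact ⟨st', c', by rw [hstep, hfold1, he]; simp⟩
            · by_cases hc : c = ')'
              · subst hc
                rw [show parseB (f+1) (')'::rest) s cur = ([], rest, true) by
                  simp only [parseB]; simp] at hp
                simp only [Prod.mk.injEq] at hp
                obtain ⟨rfl, rfl, rfl⟩ := hp
                refine ⟨fun _ => ?_, fun h => by simp at h⟩
                cases stack with
                | nil =>
                  have hstep : List.foldl calcStepA (signos, [s], cur) (')'::rest)
                      = List.foldl calcStepA (signos, [], 0) rest := by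
                    simp [List.foldl, calcStepA]
                  rw [hstep, foldl_frozen]; simp [contA]
                | cons t st =>
                  have hstep : List.foldl calcStepA (signos, s :: t :: st, cur) (')'::rest)
                      = List.foldl calcStepA (signos, t :: st, t) rest := by
                    simp [List.foldl, calcStepA]
                  rw [hstep]; simp [contA]
              · rw [show parseB (f+1) (c::rest) s cur = parseB f rest s cur by
                  simp only [parseB, hx, hpl, hm, ho, hc]; simp [hx, hpl, hm, ho, hc]] at hp
                have hstep : List.foldl calcStepA (signos, s :: stack, cur) (c::rest)
                    = List.foldl calcStepA (signos, s :: stack, cur) rest := by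
                  simp [List.foldl, calcStepA, hx, hpl, hm, ho, hc]
                have H := ih rest hrl s cur sub r cl hp signos stack
                exact ⟨fun h => by rw [hstep]; exact H.1 h, fun h => by rw [hstep]; exact H.2 h⟩

lemma ab_eq (e : String) : calcular_signos e = calcular_signos_alt e := by
  unfold calcular_signos calcular_signos_alt
  rcases hp : parseB e.toList.length e.toList 1 1 with ⟨sub, r, cl⟩
  have H := parse_fold e.toList.length e.toList le_rfl 1 1 sub r cl hp ([] : List Int) ([] : List Int)
  cases cl with
  | true => rw [H.1 rfl]; simp [contA]
  | false => obtain ⟨st', c', he⟩ := H.2 rfl; rw [he]; simp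

-- ===== VERDICT (by name: the statement is the Claim_ definition above) =====
theorem calcular_signos_spec : Claim_equal_calcular_signos := by
  intro e _ _
  unfold Spec_calcular_signos
  exact ab_eq e
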